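-- pv_equiv track=rewrite | github.com/ajarac/advent_of_code | 2015/day08/solution.py | part2
-- ===== SOURCE A (Python) =====
-- def part2(input_text: str) -> str:
--     total_code_len = 0
--     total_encoded_len = 0
--
--     for line in input_text.strip().split('\n'):
--         total_code_len += len(line)
--
--         # Re-encode: escape backslashes and quotes
--         encoded = line.replace('\\', '\\\\').replace('"', '\\"')
--         encoded = f'"{encoded}"'  # wrap in quotes
--         total_encoded_len += len(encoded)
--
--     return total_encoded_len - total_code_len
-- ===== SOURCE B (Python) =====
-- def part2(input_text: str) -> str:
--     # Closed form: re-encoding a line adds 2 wrapping quotes plus one extra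
--     # character per backslash and per double-quote; no string is built.
--     total = 0
--     for line in input_text.strip().split('\n'):
--         total += 2 + line.count('\\') + line.count('"')
--     return total
-- ===== Notes on version B (the rewrite author's own statement) =====
-- stated objective: simpler
-- what changed: B never constructs the re-encoded string: it accumulates the per-line length difference directly as a closed form (2 plus the number of backslash and double-quote characters in the line), replacing A's two replace-built strings and two running totals with one accumulator.
import Mathlib
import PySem

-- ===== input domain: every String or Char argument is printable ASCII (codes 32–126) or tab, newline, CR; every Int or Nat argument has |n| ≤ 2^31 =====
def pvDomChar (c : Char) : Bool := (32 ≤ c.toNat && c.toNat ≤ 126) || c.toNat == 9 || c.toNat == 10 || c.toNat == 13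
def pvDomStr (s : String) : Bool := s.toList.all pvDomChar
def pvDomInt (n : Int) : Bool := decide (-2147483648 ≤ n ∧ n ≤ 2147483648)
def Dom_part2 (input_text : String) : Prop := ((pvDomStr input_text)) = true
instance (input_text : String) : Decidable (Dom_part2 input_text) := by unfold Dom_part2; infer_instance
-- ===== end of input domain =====

-- B accumulates the per-line length difference directly (2 + #backslashes + #quotes) instead of building the re-encoded strings (objective: simpler).

-- ===== PORT A =====
-- literal transliteration of A: two running totals over the stripped lines,
-- the encoded string built via two replaces and a quote wrap, then the difference.
-- (split? never returns none here since the separator "\n" is nonempty; getD [] is only a totality guard)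
def part2 (input_text : String) : Int :=
  let lines := (PySem.Str.split? (PySem.Str.strip input_text) "\n").getD []
  let st := lines.foldl
    (fun (st : Int × Int) line =>
      let total_code_len := st.1 + (PySem.Str.len line : Int)
      let encoded := PySem.Str.replace line "\\" "\\\\"
      let encoded := PySem.Str.replace encoded "\"" "\\\""
      let encoded := "\"" ++ encoded ++ "\""
      (total_code_len, st.2 + (PySem.Str.len encoded : Int)))
    (0, 0)
  st.2 - st.1

-- ===== PORT B =====
def part2_alt (input_text : String) : Int :=
  let lines := (PySem.Str.split? (PySem.Str.strip input_text) "\n").getD []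
  lines.foldl
    (fun total line =>
      total + 2 + (PySem.Str.count line "\\" : Int) + (PySem.Str.count line "\"" : Int))
    0

-- ===== PRECONDITION & SPEC =====
def Spec_part2 (input_text : String) (out : Int) : Prop := out = part2_alt input_text
instance (input_text : String) (out : Int) : Decidable (Spec_part2 input_text out) := by unfold Spec_part2; infer_instance

-- ===== CLAIM (what is proved, stated in full; the proofs are below) =====
def Claim_equal_part2 : Prop := ∀ (input_text : String), Dom_part2 input_text → Spec_part2 input_text (part2 input_text)

-- ===== LEMMAS AND PROOFS =====

-- replace with a single-char pattern is a flatMap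
theorem rep_go_single (o : Char) (nw : List Char) :
    ∀ (l acc : List Char) (fuel : Nat), l.length ≤ fuel →
      PySem.Chars.replace.go [o] nw fuel l acc
        = acc.reverse ++ l.flatMap (fun c => if c = o then nw else [c]) := by
  intro l
  induction l with
  | nil =>
      intro acc fuel _
      cases fuel <;> simp [PySem.Chars.replace.go]
  | cons c t ih =>
      intro acc fuel hf
      cases fuel with
      | zero => simp at hf
      | succ f =>
          have ht : t.length ≤ f := Nat.le_of_succ_le_succ hf
          by_cases h : c = o
          · subst h
            simp only [PySem.Chars.replace.go, List.isPrefixOf, beq_self_eq_true,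
              Bool.true_and, List.length_cons,
              List.length_nil, List.drop_succ_cons, List.drop_zero]
            rw [ih (nw.reverse ++ acc) f ht]
            simp [List.flatMap_cons]
          · simp only [PySem.Chars.replace.go, List.isPrefixOf]
            rw [if_neg (by simp [Ne.symm h])]
            rw [ih (c :: acc) f ht]
            simp [List.flatMap_cons, h]

theorem rep_single (l : List Char) (o : Char) (nw : List Char) :
    PySem.Chars.replace l [o] nw = l.flatMap (fun c => if c = o then nw else [c]) := by
  rw [PySem.Chars.replace]
  simp only [List.isEmpty_cons, if_neg Bool.false_ne_true]
  simpa using rep_go_single o nw l [] l.length le_rfl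

-- count with a single-char pattern is List.count
theorem cnt_go_single (o : Char) :
    ∀ (l : List Char) (acc : Nat) (fuel : Nat), l.length ≤ fuel →
      PySem.Chars.count.go [o] fuel l acc = acc + l.count o := by
  intro l
  induction l with
  | nil =>
      intro acc fuel _
      cases fuel <;> simp [PySem.Chars.count.go]
  | cons c t ih =>
      intro acc fuel hf
      cases fuel with
      | zero => simp at hf
      | succ f =>
          have ht : t.length ≤ f := Nat.le_of_succ_le_succ hf
          by_cases h : c = o
          · subst h
            simp only [PySem.Chars.count.go, List.isPrefixOf, beq_self_eq_true,
              Bool.true_and, List.length_cons,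
              List.length_nil, List.drop_succ_cons, List.drop_zero]
            rw [ih (acc + 1) f ht]
            simp
            omega
          · simp only [PySem.Chars.count.go, List.isPrefixOf]
            rw [if_neg (by simp [Ne.symm h])]
            rw [ih acc f ht]
            simp [h]

theorem cnt_single (l : List Char) (o : Char) :
    PySem.Chars.count l [o] = l.count o := by
  rw [PySem.Chars.count]
  simp only [List.isEmpty_cons, if_neg Bool.false_ne_true]
  simpa using cnt_go_single o l 0 l.length le_rfl

-- length of the one-char-to-two-chars expansion
theorem len_enc (o a b : Char) (l : List Char) :
    (l.flatMap (fun c => if c = o then [a, b] else [c])).length = l.length + l.count o := by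
  induction l with
  | nil => simp
  | cons c t ih =>
      by_cases h : c = o <;>
        simp [List.flatMap_cons, ih, h] <;> omega

-- the expansion keeps the count of a character distinct from o, a, b
theorem count_enc_other (o a b q : Char) (ho : o ≠ q) (ha : a ≠ q) (hb : b ≠ q)
    (l : List Char) :
    (l.flatMap (fun c => if c = o then [a, b] else [c])).count q = l.count q := by
  induction l with
  | nil => simp
  | cons c t ih =>
      by_cases h : c = o
      · subst h
        simp [List.flatMap_cons, ih, ho, ha, hb]
      · simp [List.flatMap_cons, h, ih, List.count_cons]

-- per line: the length of A's encoded string minus the line length is B's closed form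
theorem line_diff (line : String) :
    (PySem.Str.len ("\"" ++ PySem.Str.replace (PySem.Str.replace line "\\" "\\\\") "\"" "\\\"" ++ "\"") : Int)
      - (PySem.Str.len line : Int)
      = 2 + (PySem.Str.count line "\\" : Int) + (PySem.Str.count line "\"" : Int) := by
  have hbs : ("\\" : String).toList = ['\\'] := rfl
  have hbs2 : ("\\\\" : String).toList = ['\\', '\\'] := rfl
  have hq : ("\"" : String).toList = ['"'] := rfl
  have hbq : ("\\\"" : String).toList = ['\\', '"'] := rfl
  simp only [PySem.Str.len_eq, PySem.Str.count_eq, String.toList_append,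
    PySem.Str.toList_replace, hbs, hbs2, hq, hbq, cnt_single,
    rep_single, len_enc, List.length_append, List.length_cons]
  rw [count_enc_other '\\' '\\' '\\' '"' (by decide) (by decide) (by decide)]
  push_cast
  simp only [List.length_nil]
  omega

-- the paired fold of A versus the single fold of B
theorem fold_diff (lines : List String) :
    ∀ (a b : Int),
      ((lines.foldl
        (fun (st : Int × Int) line =>
          (st.1 + (PySem.Str.len line : Int),
           st.2 + (PySem.Str.len ("\"" ++ PySem.Str.replace (PySem.Str.replace line "\\" "\\\\") "\"" "\\\"" ++ "\"") : Int)))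
        (a, b)).2
       - (lines.foldl
        (fun (st : Int × Int) line =>
          (st.1 + (PySem.Str.len line : Int),
           st.2 + (PySem.Str.len ("\"" ++ PySem.Str.replace (PySem.Str.replace line "\\" "\\\\") "\"" "\\\"" ++ "\"") : Int)))
        (a, b)).1)
      = lines.foldl
          (fun total line =>
            total + 2 + (PySem.Str.count line "\\" : Int) + (PySem.Str.count line "\"" : Int))
          (b - a) := by
  induction lines with
  | nil => intro a b; simp
  | cons line rest ih =>
      intro a b
      simp only [List.foldl_cons]
      rw [ih]
      congr 1
      have := line_diff line
      omega

-- ===== VERDICT (by name: the statement is the Claim_ definition above) =====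
theorem part2_spec : Claim_equal_part2 := by
  intro input_text _
  unfold Spec_part2 part2 part2_alt
  simpa using fold_diff ((PySem.Str.split? (PySem.Str.strip input_text) "\n").getD []) 0 0
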